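-- pv_equiv track=rewrite | github.com/DevCalebR/relayworks-ai | backend/app/services/personalization_agent.py | _first_name_from_contact_name
-- ===== SOURCE A (Python) =====
-- def _first_name_from_contact_name(contact_name: str) -> str:
--     tokens = [token.strip(" ,.") for token in contact_name.split() if token.strip(" ,.")]
--     if not tokens:
--         return ""
--     prefixes = {"mr", "mrs", "ms", "miss", "dr", "prof"}
--     while tokens and tokens[0].lower().rstrip(".") in prefixes:
--         tokens.pop(0)
--     return tokens[0] if tokens else ""
-- ===== SOURCE B (Python) =====
-- def _first_name_from_contact_name(contact_name: str) -> str: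
--     prefixes = {"mr", "mrs", "ms", "miss", "dr", "prof"}
--     for token in contact_name.split():
--         cleaned = token.strip(" ,.")
--         if not cleaned:
--             continue
--         if cleaned.lower().rstrip(".") in prefixes:
--             continue
--         return cleaned
--     return ""
-- ===== Notes on version B (the rewrite author's own statement) =====
-- stated objective: simpler
-- what changed: Replaces A's build-a-cleaned-list-then-pop-leading-prefixes two-pass scheme with a single streaming loop over the raw split tokens that cleans, skips empties/titles and returns the first real token immediately, maintaining no list at all.
import Mathlib
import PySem

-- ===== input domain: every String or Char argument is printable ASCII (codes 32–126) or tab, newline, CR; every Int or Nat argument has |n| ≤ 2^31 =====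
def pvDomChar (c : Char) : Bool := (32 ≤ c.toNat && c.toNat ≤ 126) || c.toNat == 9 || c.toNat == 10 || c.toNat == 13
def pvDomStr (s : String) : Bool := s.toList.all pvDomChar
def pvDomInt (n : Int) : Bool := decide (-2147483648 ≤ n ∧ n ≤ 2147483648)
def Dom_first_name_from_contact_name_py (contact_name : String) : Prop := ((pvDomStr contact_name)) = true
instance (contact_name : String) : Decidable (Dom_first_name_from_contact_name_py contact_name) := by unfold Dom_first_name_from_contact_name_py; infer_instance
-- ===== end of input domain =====

-- B replaces A's two passes (clean into a list, then pop leading title prefixes) with one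
-- streaming loop over the split tokens that returns the first non-empty non-title token; objective: simpler.

-- shared primitive: exact port of Python's s.rstrip(".") (drop trailing '.' characters)
def pvRstripDot (s : String) : String :=
  String.ofList ((s.toList.reverse.dropWhile (· == '.')).reverse)

-- the prefixes set literal {"mr","mrs","ms","miss","dr","prof"} (distinct elements)
def pvPrefixes : List String := ["mr", "mrs", "ms", "miss", "dr", "prof"]

-- ===== PORT A =====
-- the while-loop "while tokens and tokens[0].lower().rstrip('.') in prefixes: tokens.pop(0)"
def pvPopPrefixes : List String → List String
  | [] => []
  | t :: ts =>
    if pvPrefixes.contains (pvRstripDot (PySem.Str.lower t)) then pvPopPrefixes ts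
    else t :: ts

def first_name_from_contact_name_py (contact_name : String) : String :=
  -- tokens = [token.strip(" ,.") for token in contact_name.split() if token.strip(" ,.")]
  let tokens := (PySem.Str.split₀ contact_name).filterMap (fun token =>
    let c := PySem.Str.stripChars token " ,."
    if c = "" then none else some c)
  if tokens = [] then ""
  else
    match pvPopPrefixes tokens with
    | [] => ""
    | t :: _ => t

-- ===== PORT B =====
-- single streaming loop: for token in contact_name.split(): …
def pvAltLoop : List String → String
  | [] => ""
  | token :: rest =>
    let cleaned := PySem.Str.stripChars token " ,."
    if cleaned = "" then pvAltLoop rest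
    else if pvPrefixes.contains (pvRstripDot (PySem.Str.lower cleaned)) then pvAltLoop rest
    else cleaned

def first_name_from_contact_name_py_alt (contact_name : String) : String :=
  pvAltLoop (PySem.Str.split₀ contact_name)

-- ===== PRECONDITION & SPEC =====
def Spec_first_name_from_contact_name_py (contact_name : String) (out : String) : Prop := out = first_name_from_contact_name_py_alt contact_name
instance (contact_name : String) (out : String) : Decidable (Spec_first_name_from_contact_name_py contact_name out) := by unfold Spec_first_name_from_contact_name_py; infer_instance

-- ===== CLAIM (what is proved, stated in full; the proofs are below) =====
def Claim_equal_first_name_from_contact_name_py : Prop := ∀ (contact_name : String), Dom_first_name_from_contact_name_py contact_name → Spec_first_name_from_contact_name_py contact_name (first_name_from_contact_name_py contact_name)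

-- ===== LEMMAS AND PROOFS =====

def pvHead : List String → String
  | [] => ""
  | t :: _ => t

theorem pvLoop_eq (l : List String) :
    pvHead (pvPopPrefixes (l.filterMap (fun token =>
      let c := PySem.Str.stripChars token " ,."
      if c = "" then none else some c))) = pvAltLoop l := by
  induction l with
  | nil => rfl
  | cons t ts ih =>
    simp only [List.filterMap_cons, pvAltLoop]
    by_cases h : PySem.Str.stripChars t " ,." = ""
    · simp [h, ih]
    · simp only [if_neg h]
      simp only [pvPopPrefixes]
      by_cases hp : pvRstripDot (PySem.Str.lower (PySem.Str.stripChars t " ,.")) ∈ pvPrefixes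
      · simp [hp, ih]
      · simp [hp, pvHead]

theorem pvA_eq_head (s : String) :
    first_name_from_contact_name_py s =
      pvHead (pvPopPrefixes ((PySem.Str.split₀ s).filterMap (fun token =>
        let c := PySem.Str.stripChars token " ,."
        if c = "" then none else some c))) := by
  unfold first_name_from_contact_name_py
  by_cases h : (PySem.Str.split₀ s).filterMap (fun token =>
      let c := PySem.Str.stripChars token " ,."
      if c = "" then none else some c) = []
  · simp [h, pvPopPrefixes, pvHead]
  · simp only [if_neg h]
    cases pvPopPrefixes _ <;> rfl

-- ===== VERDICT (by name: the statement is the Claim_ definition above) =====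
theorem first_name_from_contact_name_py_spec : Claim_equal_first_name_from_contact_name_py := by
  intro s _
  unfold Spec_first_name_from_contact_name_py first_name_from_contact_name_py_alt
  rw [pvA_eq_head, pvLoop_eq]
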